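-- pv_equiv track=rewrite | github.com/fractalate/ai-chinese-checkers | previous/mark1/board.py | list_xy_around
-- ===== SOURCE A (Python) =====
-- from typing import List, Tuple, Union
--
-- def list_xy_around(x: int, y: int, size: int) -> List[Tuple[int, int]]:
--     if size == 0:
--         return []
--
--     result = []
--
--     x0, y0 = x - size, y - size
--     stride = size + 1
--     k = 0
--
--     while k < size:
--         for i in range(stride):
--             result.append((x0 + i, y0))
--         stride += 1
--         k += 1
--         y0 += 1
--
--     for i in range(stride):
--         if i != size:
--             result.append((x0 + i, y0))
--     stride -= 1
--     y0 += 1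
--
--     while k > 0:
--         x0 += 1
--         for i in range(stride):
--             result.append((x0 + i, y0))
--         stride -= 1
--         k -= 1
--         y0 += 1
--
--     return result
-- ===== SOURCE B (Python) =====
-- from typing import List, Tuple
--
-- def list_xy_around(x: int, y: int, size: int) -> List[Tuple[int, int]]:
--     result = []
--     for dy in range(-size, size + 1):
--         lo = max(-size, dy - size)
--         hi = min(size, dy + size)
--         result.extend((x + dx, y + dy) for dx in range(lo, hi + 1)
--                       if not (dx == 0 and dy == 0))
--     return result
-- ===== Notes on version B (the rewrite author's own statement) =====
-- stated objective: simpler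
-- what changed: Replaces the three-phase while/for machinery with mutating stride/k/x0/y0 state by a single nested loop with closed-form per-row bounds lo=max(-size,dy-size), hi=min(size,dy+size) and an explicit skip of the center.
import Mathlib
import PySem

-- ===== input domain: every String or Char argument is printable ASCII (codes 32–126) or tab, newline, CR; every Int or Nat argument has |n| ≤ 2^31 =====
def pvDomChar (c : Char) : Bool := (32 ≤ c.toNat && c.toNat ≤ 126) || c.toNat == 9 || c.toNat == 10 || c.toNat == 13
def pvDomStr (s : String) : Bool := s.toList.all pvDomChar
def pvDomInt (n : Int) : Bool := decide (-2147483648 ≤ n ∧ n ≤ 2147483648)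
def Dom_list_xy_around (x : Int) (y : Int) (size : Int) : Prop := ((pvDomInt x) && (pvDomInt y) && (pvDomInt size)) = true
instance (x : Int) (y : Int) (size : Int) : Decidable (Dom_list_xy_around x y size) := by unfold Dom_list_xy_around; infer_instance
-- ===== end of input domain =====

-- B replaces A's three-phase loops with mutating stride/k state by one nested loop with
-- closed-form per-row dx bounds; proved to return the identical list for all inputs.

-- ===== PORT A =====
-- `while k < size:` first phase of A (mutates y0, stride, k, result)
def pvA_up (size x0 y0 stride k : Int) (result : List (Int × Int)) :
    List (Int × Int) × Int × Int × Int :=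
  if _h : k < size then
    pvA_up size x0 (y0 + 1) (stride + 1) (k + 1)
      (result ++ (PySem.List.pyRange 0 stride 1).map (fun i => (x0 + i, y0)))
  else (result, stride, k, y0)
termination_by (size - k).toNat
decreasing_by omega

-- `while k > 0:` third phase of A (mutates x0, y0, stride, k, result)
def pvA_down (x0 y0 stride k : Int) (result : List (Int × Int)) : List (Int × Int) :=
  if _h : 0 < k then
    pvA_down (x0 + 1) (y0 + 1) (stride - 1) (k - 1)
      (result ++ (PySem.List.pyRange 0 stride 1).map (fun i => (x0 + 1 + i, y0)))
  else result
termination_by k.toNat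
decreasing_by omega

def list_xy_around (x : Int) (y : Int) (size : Int) : List (Int × Int) :=
  if size = 0 then []
  else
    let x0 := x - size
    let y0 := y - size
    let stride := size + 1
    let t := pvA_up size x0 y0 stride 0 []
    let result := t.1
    let stride1 := t.2.1
    let k1 := t.2.2.1
    let y1 := t.2.2.2
    let result2 := (PySem.List.pyRange 0 stride1 1).foldl
      (fun r i => if i ≠ size then r ++ [(x0 + i, y1)] else r) result
    pvA_down x0 (y1 + 1) (stride1 - 1) k1 result2

-- ===== PORT B =====
def list_xy_around_alt (x : Int) (y : Int) (size : Int) : List (Int × Int) :=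
  (PySem.List.pyRange (-size) (size + 1) 1).foldl (fun result dy =>
    let lo := max (-size) (dy - size)
    let hi := min size (dy + size)
    result ++ (PySem.List.pyRange lo (hi + 1) 1).filterMap (fun dx =>
      if dx = 0 ∧ dy = 0 then none else some (x + dx, y + dy))) []

-- ===== PRECONDITION & SPEC =====
def Spec_list_xy_around (x : Int) (y : Int) (size : Int) (out : List (Int × Int)) : Prop := out = list_xy_around_alt x y size
instance (x : Int) (y : Int) (size : Int) (out : List (Int × Int)) : Decidable (Spec_list_xy_around x y size out) := by unfold Spec_list_xy_around; infer_instance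

-- ===== CLAIM (what is proved, stated in full; the proofs are below) =====
def Claim_equal_list_xy_around : Prop := ∀ (x : Int) (y : Int) (size : Int), Dom_list_xy_around x y size → Spec_list_xy_around x y size (list_xy_around x y size)

-- ===== LEMMAS AND PROOFS =====

-- one row of the hexagon, as B produces it
def hexRow (x y size dy : Int) : List (Int × Int) :=
  ((PySem.List.pyRange (max (-size) (dy - size)) (min size (dy + size) + 1) 1).filter
    (fun dx => decide ¬(dx = 0 ∧ dy = 0))).map (fun dx => (x + dx, y + dy))

-- pure unrollings of A's two while loops
def upPure (x0 y0 stride : Int) : Nat → List (Int × Int)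
  | 0 => []
  | m + 1 => ((PySem.List.pyRange 0 stride 1).map fun i => (x0 + i, y0)) ++
      upPure x0 (y0 + 1) (stride + 1) m

def downPure (x0 y0 stride : Int) : Nat → List (Int × Int)
  | 0 => []
  | m + 1 => ((PySem.List.pyRange 0 stride 1).map fun i => (x0 + 1 + i, y0)) ++
      downPure (x0 + 1) (y0 + 1) (stride - 1) m

theorem up_eq (m : Nat) : ∀ (size x0 y0 stride k : Int) (result : List (Int × Int)),
    size - k = (m : Int) →
    pvA_up size x0 y0 stride k result =
      (result ++ upPure x0 y0 stride m, stride + m, size, y0 + m) := by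
  induction m with
  | zero =>
    intro size x0 y0 stride k result h
    rw [pvA_up, dif_neg (by omega)]
    simp [upPure]
    omega
  | succ m ih =>
    intro size x0 y0 stride k result h
    rw [pvA_up]
    rw [dif_pos (by omega)]
    rw [ih size x0 (y0 + 1) (stride + 1) (k + 1) _ (by omega)]
    simp [upPure, List.append_assoc, Prod.ext_iff]
    omega

theorem down_eq (m : Nat) : ∀ (x0 y0 stride k : Int) (result : List (Int × Int)),
    k = (m : Int) →
    pvA_down x0 y0 stride k result = result ++ downPure x0 y0 stride m := by
  induction m with
  | zero =>
    intro x0 y0 stride k result h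
    rw [pvA_down]
    simp [downPure, h]
  | succ m ih =>
    intro x0 y0 stride k result h
    rw [pvA_down]
    rw [dif_pos (by omega)]
    rw [ih (x0 + 1) (y0 + 1) (stride - 1) (k - 1) _ (by omega)]
    simp [downPure, List.append_assoc]

theorem map_pyRange_shift {α : Type} (f : Int → α) (a b : Int) :
    (PySem.List.pyRange a b 1).map f =
      (List.range (b - a).toNat).map (fun k : Nat => f (a + (k : Int))) := by
  rw [PySem.List.pyRange_one, List.map_map]
  rfl

theorem filter_pyRange_shift (p : Int → Bool) (a b : Int) :
    (PySem.List.pyRange a b 1).filter p =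
      ((List.range (b - a).toNat).filter (fun k : Nat => p (a + (k : Int)))).map
        (fun k : Nat => a + (k : Int)) := by
  rw [PySem.List.pyRange_one, List.filter_map]
  rfl

theorem hexRow_ne (x y size dy : Int) (h : dy ≠ 0) :
    hexRow x y size dy =
      (PySem.List.pyRange (max (-size) (dy - size)) (min size (dy + size) + 1) 1).map
        (fun dx => (x + dx, y + dy)) := by
  unfold hexRow
  congr 1
  apply List.filter_eq_self.mpr
  intro a _
  simp [h]

theorem up_rows (x y s : Int) (hs : 0 < s) : ∀ (m : Nat) (d : Int), d = -(m : Int) → -s ≤ d →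
    upPure (x - s) (y + d) (s + 1 + s + d) m =
      (PySem.List.pyRange d 0 1).flatMap (hexRow x y s) := by
  intro m
  induction m generalizing x y with
  | zero =>
    intro d hd _
    rw [hd]
    simp [upPure, PySem.List.pyRange_one_eq_nil]
  | succ m ih =>
    intro d hd hge
    have hd0 : d < 0 := by omega
    rw [PySem.List.pyRange_one_cons hd0, List.flatMap_cons]
    rw [upPure]
    congr 1
    · -- the row
      rw [hexRow_ne _ _ _ _ (by omega)]
      have hlo : max (-s) (d - s) = -s := max_eq_left (by omega)
      have hhi : min s (d + s) = d + s := min_eq_right (by omega)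
      rw [hlo, hhi]
      rw [map_pyRange_shift, map_pyRange_shift]
      have hlen : (s + 1 + s + d - 0).toNat = (d + s + 1 - -s).toNat := by omega
      rw [hlen]
      apply List.map_congr_left
      intro k _
      simp only [Prod.mk.injEq]
      exact ⟨by omega, trivial⟩
    · -- the tail
      have := ih (x := x) (y := y) (d + 1) (by omega) (by omega)
      have e1 : y + d + 1 = y + (d + 1) := by ring
      have e2 : s + 1 + s + d + 1 = s + 1 + s + (d + 1) := by ring
      rw [e1, e2, this]

theorem down_rows (x y s : Int) (hs : 0 < s) : ∀ (m : Nat) (d : Int), d = s - (m : Int) → 0 ≤ d →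
    downPure (x - m) (y + d + 1) (s + m) m =
      (PySem.List.pyRange (d + 1) (s + 1) 1).flatMap (hexRow x y s) := by
  intro m
  induction m generalizing x y with
  | zero =>
    intro d hd _
    rw [hd]
    simp [downPure, PySem.List.pyRange_one_eq_nil]
  | succ m ih =>
    intro d hd hge
    have hcons : PySem.List.pyRange (d + 1) (s + 1) 1 =
        (d + 1) :: PySem.List.pyRange (d + 1 + 1) (s + 1) 1 :=
      PySem.List.pyRange_one_cons (by omega)
    rw [hcons, List.flatMap_cons]
    rw [downPure]
    congr 1
    · rw [hexRow_ne _ _ _ _ (by omega)]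
      have hlo : max (-s) (d + 1 - s) = d + 1 - s := max_eq_right (by omega)
      have hhi : min s (d + 1 + s) = s := min_eq_left (by omega)
      rw [hlo, hhi]
      rw [map_pyRange_shift, map_pyRange_shift]
      have hlen : (s + (m + 1 : Nat) - 0).toNat = (s + 1 - (d + 1 - s)).toNat := by
        push_cast; omega
      rw [hlen]
      apply List.map_congr_left
      intro k _
      simp only [Prod.mk.injEq]
      constructor <;> omega
    · have := ih (x := x) (y := y) (d + 1) (by push_cast at hd ⊢; omega) (by omega)
      have e1 : x - ((m : Int) + 1) + 1 = x - m := by ring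
      have e2 : y + d + 1 + 1 = y + (d + 1) + 1 := by ring
      have e3 : s + ((m : Int) + 1) - 1 = s + m := by ring
      push_cast
      rw [e1, e2, e3, this]

theorem mid_eq (x y s : Int) (result : List (Int × Int)) (hs : 0 < s) :
    (PySem.List.pyRange 0 (2 * s + 1) 1).foldl
      (fun r i => if i ≠ s then r ++ [(x - s + i, y)] else r) result =
    result ++ hexRow x y s 0 := by
  rw [PySem.List.foldl_append_ite]
  congr 1
  unfold hexRow
  have hlo : max (-s) (0 - s) = -s := max_eq_left (by omega)
  have hhi : min s (0 + s) = s := min_eq_left (by omega)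
  rw [hlo, hhi]
  rw [filter_pyRange_shift, filter_pyRange_shift, List.map_map, List.map_map]
  have hlen : (2 * s + 1 - 0).toNat = (s + 1 - -s).toNat := by omega
  rw [hlen]
  have hfil : (List.range (s + 1 - -s).toNat).filter
        (fun k : Nat => decide ((0 : Int) + (k : Int) ≠ s)) =
      (List.range (s + 1 - -s).toNat).filter
        (fun k : Nat => decide ¬((-s + (k : Int)) = 0 ∧ (0 : Int) = 0)) := by
    apply List.filter_congr
    intro k _
    rw [decide_eq_decide]
    constructor <;> intro h <;> omega
  rw [hfil]
  apply List.map_congr_left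
  intro k _
  simp only [Function.comp, Prod.mk.injEq]
  constructor <;> omega

theorem filterMap_if_eq_filter_map {α β : Type} (p : α → Prop) [DecidablePred p]
    (f : α → β) (l : List α) :
    l.filterMap (fun a => if p a then none else some (f a)) =
      (l.filter (fun a => decide ¬ p a)).map f := by
  induction l with
  | nil => simp
  | cons a t ih => by_cases h : p a <;> simp [h, ih]

theorem alt_rows (x y size : Int) :
    list_xy_around_alt x y size =
      (PySem.List.pyRange (-size) (size + 1) 1).flatMap (hexRow x y size) := by
  unfold list_xy_around_alt
  have hrow : ∀ dy : Int,
      (PySem.List.pyRange (max (-size) (dy - size)) (min size (dy + size) + 1) 1).filterMap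
        (fun dx => if dx = 0 ∧ dy = 0 then none else some (x + dx, y + dy)) =
      hexRow x y size dy := by
    intro dy
    rw [filterMap_if_eq_filter_map]
    rfl
  simp only [hrow]
  rw [PySem.List.foldl_append_eq_flatMap]
  simp

theorem a_eq_rows (x y s : Int) (hs : 0 < s) :
    list_xy_around x y s =
      (PySem.List.pyRange (-s) (s + 1) 1).flatMap (hexRow x y s) := by
  obtain ⟨n, hn⟩ : ∃ n : Nat, (n : Int) = s := ⟨s.toNat, by omega⟩
  have h1 := up_eq n s (x - s) (y - s) (s + 1) 0 [] (by omega)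
  unfold list_xy_around
  rw [if_neg (by omega)]
  simp only [h1]
  have hy : y - s + (n : Int) = y := by omega
  have hst : s + 1 + (n : Int) = 2 * s + 1 := by omega
  rw [hy, hst]
  rw [mid_eq x y s _ hs]
  have hst2 : 2 * s + 1 - 1 = s + (n : Int) := by omega
  rw [hst2]
  rw [down_eq n (x - s) (y + 1) (s + n) s _ (by omega)]
  have hup : upPure (x - s) (y - s) (s + 1) n =
      (PySem.List.pyRange (-s) 0 1).flatMap (hexRow x y s) := by
    have h := up_rows x y s hs n (-s) (by omega) (by omega)
    have e1 : y + -s = y - s := by ring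
    have e2 : s + 1 + s + -s = s + 1 := by ring
    rw [e1, e2] at h
    exact h
  have hdown : downPure (x - s) (y + 1) (s + n) n =
      (PySem.List.pyRange 1 (s + 1) 1).flatMap (hexRow x y s) := by
    have h := down_rows x y s hs n 0 (by omega) (by omega)
    have e1 : x - (n : Int) = x - s := by omega
    rw [e1] at h
    simpa using h
  rw [hup, hdown]
  rw [PySem.List.pyRange_one_append (-s) 0 (s + 1) (by omega) (by omega)]
  rw [PySem.List.pyRange_one_cons (show (0 : Int) < s + 1 by omega)]
  rw [List.flatMap_append, List.flatMap_cons]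
  simp [List.append_assoc]

-- ===== VERDICT (by name: the statement is the Claim_ definition above) =====
theorem list_xy_around_spec : Claim_equal_list_xy_around := by
  intro x y size _
  unfold Spec_list_xy_around
  rcases lt_trichotomy size 0 with hneg | hzero | hpos
  · have hA : list_xy_around x y size = [] := by
      have h1 : pvA_up size (x - size) (y - size) (size + 1) 0 [] =
          ([], size + 1, 0, y - size) := by
        rw [pvA_up, dif_neg (by omega)]
      unfold list_xy_around
      rw [if_neg (by omega)]
      simp only [h1, PySem.List.pyRange_one_eq_nil (show size + 1 ≤ 0 by omega),
        List.foldl_nil]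
      rw [pvA_down, dif_neg (by omega)]
    rw [hA, alt_rows, PySem.List.pyRange_one_eq_nil (by omega)]
    simp
  · subst hzero
    have hA : list_xy_around x y 0 = [] := by simp [list_xy_around]
    rw [hA, alt_rows]
    have h01 : PySem.List.pyRange (-(0 : Int)) (0 + 1) 1 = [0] := by decide
    rw [h01]
    have hrow : hexRow x y 0 0 = [] := by
      unfold hexRow
      have : PySem.List.pyRange (max (-(0 : Int)) (0 - 0)) (min 0 (0 + 0) + 1) 1 = [0] := by decide
      rw [this]
      simp
    simp [hrow]
  · rw [a_eq_rows x y size hpos, alt_rows]
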